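-- pv_equiv track=rewrite | github.com/chrilef/BactEpiGenPro | SeqWord MotifMapper 3.2.6 [16.03.2025]-20250317T093543Z-001/SeqWord MotifMapper 3.2.6 [16.03.2025]/lib/tools.py | dereplicate_and_count
-- ===== SOURCE A (Python) =====
-- import os, string, random, math, copy, re
--
-- def dereplicate_and_count(ls, flg_absolute_falues=False):  # ls = [[value, count],...]
--
--     def _is_equal(v1, v2, flg_absolute_falues):
--         if flg_absolute_falues:
--             try:
--                 v1 = float(v1)
--                 v2 = float(v2)
--                 return abs(v1) == abs(v2)
--             except:
--                 v1 = str(v1).upper()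
--                 v2 = str(v2).upper()
--                 return v1 == v2
--         else:
--             return v1 == v2
--
--     if len(ls) < 2:
--         return ls
--     ls = copy.deepcopy(ls)
--     if flg_absolute_falues:
--         ls.sort(key=lambda ls: abs(ls[0]) if (isinstance(ls[0],int) or isinstance(ls[0],float)) else str(ls[0]).upper())
--     else:
--         ls.sort(key=lambda ls: ls[0])
--     for i in range(len(ls) - 1, 0, -1):
--         if _is_equal(ls[i][0], ls[i-1][0], flg_absolute_falues):
--             ls[i-1][1] += ls[i][1]
--             del ls[i]
--     return ls
-- ===== SOURCE B (Python) =====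
-- def dereplicate_and_count(ls, flg_absolute_falues=False):  # ls = [[value, count],...]
--     # Single forward pass over the sorted list: accumulate counts into the last
--     # emitted row instead of repeatedly deleting from the list (O(n log n)).
--     if len(ls) < 2:
--         return ls
--     if flg_absolute_falues:
--         def key(row):
--             v = row[0]
--             return abs(v) if isinstance(v, (int, float)) else str(v).upper()
--     else:
--         def key(row):
--             return row[0]
--     out = []
--     prev_key = None
--     for row in sorted(ls, key=key):
--         k = key(row)
--         if out and k == prev_key:
--             out[-1][1] += row[1]
--         else:
--             out.append(list(row))
--         prev_key = k
--     return out
-- ===== Notes on version B (the rewrite author's own statement) =====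
-- stated objective: faster
-- what changed: Replaces A's backward index loop with in-place del (O(n) per deletion) by a single forward pass over the sorted list that appends rows and accumulates counts into the last emitted row.
import Mathlib
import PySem

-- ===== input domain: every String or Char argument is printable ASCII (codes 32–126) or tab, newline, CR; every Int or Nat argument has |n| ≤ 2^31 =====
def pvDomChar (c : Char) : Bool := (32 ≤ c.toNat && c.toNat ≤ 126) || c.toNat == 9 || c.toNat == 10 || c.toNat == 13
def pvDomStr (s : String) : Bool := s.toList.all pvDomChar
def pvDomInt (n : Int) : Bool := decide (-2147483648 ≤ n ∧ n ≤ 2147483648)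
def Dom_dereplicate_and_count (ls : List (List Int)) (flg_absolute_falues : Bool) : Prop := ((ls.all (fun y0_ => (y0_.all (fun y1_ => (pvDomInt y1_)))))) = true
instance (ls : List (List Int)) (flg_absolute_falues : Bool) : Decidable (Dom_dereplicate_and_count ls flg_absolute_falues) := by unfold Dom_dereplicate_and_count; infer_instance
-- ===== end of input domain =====

-- B replaces A's backward index loop with repeated in-place `del` by one forward pass
-- over the sorted list that accumulates counts into the last emitted row (objective: faster).
-- Neither implementation mutates the caller's argument (A deepcopies, B builds a fresh list).

-- ===== PORT A =====
-- sort key `abs(ls[0]) if isinstance(ls[0], int/float) else str(ls[0]).upper()`: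
-- rows hold Ints here, so the numeric branch always applies; row[0] of an empty row
-- raises IndexError in Python, which Pre_ excludes (getD [] / getD 0 are junk there).
def pvKeyA (flg : Bool) (row : List Int) : Int :=
  if flg then |(PySem.List.pyGet? row 0).getD 0| else (PySem.List.pyGet? row 0).getD 0

-- _is_equal on Int values: float() of an Int with |n| ≤ 2^31 is exact, so the
-- flg branch is exactly |v1| = |v2|; the except-branch is unreachable for Ints.
def pvEqA (flg : Bool) (v1 v2 : Int) : Bool :=
  if flg then |v1| == |v2| else v1 == v2

-- one iteration of `for i in range(len(ls)-1, 0, -1)` (vi = ls[i], vim = ls[i-1])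
def pvAStep (flg : Bool) (l : List (List Int)) (i : Nat) : List (List Int) :=
  let vi := (PySem.List.pyGet? l ((i : Nat) : Int)).getD []
  let vim := (PySem.List.pyGet? l (((i : Nat) : Int) - 1)).getD []
  if pvEqA flg ((PySem.List.pyGet? vi 0).getD 0) ((PySem.List.pyGet? vim 0).getD 0) then
    (l.set (i - 1) (vim.set 1 ((PySem.List.pyGet? vim 1).getD 0 + (PySem.List.pyGet? vi 1).getD 0))).eraseIdx i
  else l

def pvALoop (flg : Bool) : List (List Int) → Nat → List (List Int)
  | l, 0 => l
  | l, Nat.succ i => pvALoop flg (pvAStep flg l (i + 1)) i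

def dereplicate_and_count (ls : List (List Int)) (flg_absolute_falues : Bool) : List (List Int) :=
  if ls.length < 2 then ls
  else
    let s := PySem.List.sorted ls (pvKeyA flg_absolute_falues) false
    pvALoop flg_absolute_falues s (s.length - 1)

-- ===== PORT B =====
def pvKeyB (flg : Bool) (row : List Int) : Int :=
  if flg then |(PySem.List.pyGet? row 0).getD 0| else (PySem.List.pyGet? row 0).getD 0

-- out[-1][1] += c
def pvBUpd (out : List (List Int)) (c : Int) : List (List Int) :=
  let last := (PySem.List.pyGet? out (-1)).getD []
  out.set (out.length - 1) (last.set 1 ((PySem.List.pyGet? last 1).getD 0 + c))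

def pvBGo (flg : Bool) : List (List Int) → Option Int → List (List Int) → List (List Int)
  | out, _, [] => out
  | out, prev, row :: rest =>
    let k := pvKeyB flg row
    if (!out.isEmpty) && (prev == some k) then
      pvBGo flg (pvBUpd out ((PySem.List.pyGet? row 1).getD 0)) (some k) rest
    else
      pvBGo flg (out ++ [row]) (some k) rest

def dereplicate_and_count_alt (ls : List (List Int)) (flg_absolute_falues : Bool) : List (List Int) :=
  if ls.length < 2 then ls
  else pvBGo flg_absolute_falues [] none (PySem.List.sorted ls (pvKeyB flg_absolute_falues) false)

-- ===== PRECONDITION & SPEC =====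
-- key of a row, as seen by the sort and by _is_equal (headI = row[0]; 0 is junk for [])
def pvKey (flg : Bool) (row : List Int) : Int :=
  if flg then |row.headI| else row.headI

-- Pre_ excludes exactly the inputs on which the Python A raises IndexError (when
-- len(ls) >= 2: an empty row — ls[i][0] / the sort key fails — or a one-element row
-- [v] whose key collides with another row's key, so the merge reads/writes its
-- missing count ls[i][1]).  B raises on exactly the same inputs.
def Pre_dereplicate_and_count (ls : List (List Int)) (flg_absolute_falues : Bool) : Prop :=
  ls.length < 2 ∨
    ∀ r ∈ ls, r ≠ [] ∧ (r.length = 1 →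
      (ls.map (pvKey flg_absolute_falues)).count (pvKey flg_absolute_falues r) ≤ 1)
instance (ls : List (List Int)) (flg_absolute_falues : Bool) : Decidable (Pre_dereplicate_and_count ls flg_absolute_falues) := by unfold Pre_dereplicate_and_count; infer_instance

def pvWitness_dereplicate_and_count : List (List Int) × Bool := ([[1, 2], [1, 3], [-2, 5]], true)

def Spec_dereplicate_and_count (ls : List (List Int)) (flg_absolute_falues : Bool) (out : List (List Int)) : Prop := out = dereplicate_and_count_alt ls flg_absolute_falues
instance (ls : List (List Int)) (flg_absolute_falues : Bool) (out : List (List Int)) : Decidable (Spec_dereplicate_and_count ls flg_absolute_falues out) := by unfold Spec_dereplicate_and_count; infer_instance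

-- ===== CLAIM (what is proved, stated in full; the proofs are below) =====
def Claim_equal_dereplicate_and_count : Prop := ∀ (ls : List (List Int)) (flg_absolute_falues : Bool), Dom_dereplicate_and_count ls flg_absolute_falues → Pre_dereplicate_and_count ls flg_absolute_falues → Spec_dereplicate_and_count ls flg_absolute_falues (dereplicate_and_count ls flg_absolute_falues)

-- ===== LEMMAS AND PROOFS =====

-- row with its count (index 1) incremented by c; a no-op for rows shorter than 2
def pvBump (row : List Int) (c : Int) : List Int := row.set 1 (row[1]?.getD 0 + c)

-- canonical meaning of A's backward loop: merge adjacent equal-key rows, right to left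
-- (pvIns x m = put row x in front of m, merging into m's head if the keys agree)
def pvIns (flg : Bool) (x : List Int) : List (List Int) → List (List Int)
  | [] => [x]
  | y :: t => if pvKey flg x = pvKey flg y then pvBump x (y[1]?.getD 0) :: t else x :: y :: t

def pvMergeA (flg : Bool) : List (List Int) → List (List Int)
  | [] => []
  | x :: rest => pvIns flg x (pvMergeA flg rest)

-- adjacent rows with equal keys both have a count slot (what Pre_ gives on the sorted list)
def pvGood (flg : Bool) : List (List Int) → Prop
  | a :: b :: t => (pvKey flg a = pvKey flg b → 2 ≤ a.length ∧ 2 ≤ b.length) ∧ pvGood flg (b :: t)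
  | _ => True

theorem pvHead0 (row : List Int) : (PySem.List.pyGet? row (0 : Int)).getD 0 = row.headI := by
  rw [show (0 : Int) = ((0 : Nat) : Int) from rfl, PySem.List.pyGet?_natCast]
  cases row <;> simp

theorem pvGet1 (row : List Int) : (PySem.List.pyGet? row (1 : Int)).getD 0 = row[1]?.getD 0 := by
  rw [show (1 : Int) = ((1 : Nat) : Int) from rfl, PySem.List.pyGet?_natCast]

theorem pvKeyA_eq (flg : Bool) (row : List Int) : pvKeyA flg row = pvKey flg row := by
  simp [pvKeyA, pvKey, pvHead0]

theorem pvKeyB_eq (flg : Bool) (row : List Int) : pvKeyB flg row = pvKey flg row := by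
  simp [pvKeyB, pvKey, pvHead0]

theorem pvEqA_iff (flg : Bool) (a b : List Int) :
    pvEqA flg b.headI a.headI = true ↔ pvKey flg a = pvKey flg b := by
  cases flg <;> simp [pvEqA, pvKey] <;> exact eq_comm

theorem pvBump_headI (row : List Int) (c : Int) : (pvBump row c).headI = row.headI := by
  cases row <;> simp [pvBump]

theorem pvKey_bump (flg : Bool) (row : List Int) (c : Int) :
    pvKey flg (pvBump row c) = pvKey flg row := by
  simp [pvKey, pvBump_headI]

theorem pvBump_length (row : List Int) (c : Int) : (pvBump row c).length = row.length := by
  simp [pvBump]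

theorem pvMergeA_head (flg : Bool) (x : List Int) (t : List (List Int)) :
    ∃ z t', pvMergeA flg (x :: t) = z :: t' ∧ pvKey flg z = pvKey flg x := by
  cases h : pvMergeA flg t with
  | nil => exact ⟨x, [], by simp [pvMergeA, pvIns, h], rfl⟩
  | cons y t' =>
    by_cases hk : pvKey flg x = pvKey flg y
    · exact ⟨pvBump x (y[1]?.getD 0), t', by simp [pvMergeA, pvIns, h, hk], pvKey_bump flg x _⟩
    · exact ⟨x, y :: t', by simp [pvMergeA, pvIns, h, hk], rfl⟩

theorem pvMergeA_exists_cons (flg : Bool) (l : List (List Int)) (h : l ≠ []) :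
    ∃ z t', pvMergeA flg l = z :: t' := by
  cases l with
  | nil => exact absurd rfl h
  | cons x t =>
    obtain ⟨z, t', hz, -⟩ := pvMergeA_head flg x t
    exact ⟨z, t', hz⟩

-- no-merge: a trailing row with a fresh key just stays at the end
theorem pvMergeA_append_ne (flg : Bool) (zs : List (List Int)) (a b : List Int)
    (h : pvKey flg a ≠ pvKey flg b) :
    pvMergeA flg (zs ++ [a, b]) = pvMergeA flg (zs ++ [a]) ++ [b] := by
  induction zs with
  | nil => simp [pvMergeA, pvIns, h]
  | cons z zs ih =>
    obtain ⟨w, t, hw⟩ := pvMergeA_exists_cons flg (zs ++ [a]) (by simp)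
    simp only [List.cons_append, pvMergeA]
    rw [ih, hw]
    by_cases hk : pvKey flg z = pvKey flg w <;> simp [pvIns, hk]

-- merge: the last boundary can be collapsed first
theorem pvMergeA_append_eq (flg : Bool) (zs : List (List Int)) (a b : List Int)
    (h : pvKey flg a = pvKey flg b) :
    pvMergeA flg (zs ++ [a, b]) = pvMergeA flg (zs ++ [pvBump a (b[1]?.getD 0)]) := by
  induction zs with
  | nil => simp [pvMergeA, pvIns, h]
  | cons z zs ih =>
    simp only [List.cons_append, pvMergeA]
    rw [ih]

-- forward collapse (associativity of count accumulation); needs the count slots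
theorem pvMergeA_front (flg : Bool) (r x : List Int) (t : List (List Int))
    (hr : 2 ≤ r.length) (hx : 2 ≤ x.length) (h : pvKey flg r = pvKey flg x) :
    pvMergeA flg (r :: x :: t) = pvMergeA flg (pvBump r (x[1]?.getD 0) :: t) := by
  obtain ⟨r0, r1, rr, rfl⟩ : ∃ r0 r1 rr, r = r0 :: r1 :: rr := by
    match r, hr with | r0 :: r1 :: rr, _ => exact ⟨r0, r1, rr, rfl⟩
  obtain ⟨x0, x1, xr, rfl⟩ : ∃ x0 x1 xr, x = x0 :: x1 :: xr := by
    match x, hx with | x0 :: x1 :: xr, _ => exact ⟨x0, x1, xr, rfl⟩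
  simp only [pvMergeA]
  cases ht : pvMergeA flg t with
  | nil => simp [pvIns, pvBump, h]
  | cons y tt =>
    by_cases hxy : pvKey flg (x0 :: x1 :: xr) = pvKey flg y
    · have h1 : pvKey flg (r0 :: (r1 + x1) :: rr) = pvKey flg y := by
        simpa [pvKey] using h.trans hxy
      have h2 : pvKey flg (r0 :: r1 :: rr) = pvKey flg (x0 :: (x1 + y[1]?.getD 0) :: xr) := by
        simpa [pvKey] using h
      simp [pvIns, pvBump, hxy, h1, h2, add_assoc]
    · have h3 : ¬ pvKey flg (r0 :: (r1 + x1) :: rr) = pvKey flg y := by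
        intro hc
        apply hxy
        have hxr : pvKey flg (x0 :: x1 :: xr) = pvKey flg (r0 :: (r1 + x1) :: rr) := by
          simpa [pvKey] using h.symm
        exact hxr.trans hc
      simp [pvIns, pvBump, hxy, h, h3]

-- list surgery helpers
theorem pvSetAppend {α : Type} (zs w : List α) (v : α) :
    (zs ++ w).set zs.length v = zs ++ w.set 0 v := by
  induction zs with
  | nil => rfl
  | cons z zs ih => simp [ih]

theorem pvEraseAppend {α : Type} (zs : List α) (v b : α) (t : List α) :
    (zs ++ v :: b :: t).eraseIdx (zs.length + 1) = zs ++ v :: t := by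
  induction zs with
  | nil => rfl
  | cons z zs ih => simpa [List.eraseIdx] using ih

theorem pvGetAppend {α : Type} (zs w : List α) (k : Nat) :
    (zs ++ w)[zs.length + k]? = w[k]? := by
  rw [List.getElem?_append_right (by omega)]
  simp

theorem pvGetAppend0 {α : Type} (zs w : List α) :
    (zs ++ w)[zs.length]? = w[0]? := by
  simpa using pvGetAppend zs w 0

theorem pvTakeAppend {α : Type} (zs w : List α) (k : Nat) :
    (zs ++ w).take (zs.length + k) = zs ++ w.take k := by
  induction zs with
  | nil => simp
  | cons z zs ih =>
    simp only [List.cons_append, List.length_cons]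
    rw [show zs.length + 1 + k = (zs.length + k) + 1 from by omega]
    simp [ih]

theorem pvDropAppend {α : Type} (zs w : List α) (k : Nat) :
    (zs ++ w).drop (zs.length + k) = w.drop k := by
  induction zs with
  | nil => simp
  | cons z zs ih =>
    simp only [List.cons_append, List.length_cons]
    rw [show zs.length + 1 + k = (zs.length + k) + 1 from by omega]
    simp [ih]

-- the body of one backward-loop iteration, on a decomposed list
theorem pvAStep_split (flg : Bool) (zs : List (List Int)) (a b : List Int) (t : List (List Int)) :
    pvAStep flg (zs ++ a :: b :: t) (zs.length + 1) =
      if pvKey flg a = pvKey flg b then zs ++ pvBump a (b[1]?.getD 0) :: t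
      else zs ++ a :: b :: t := by
  have hib : (PySem.List.pyGet? (zs ++ a :: b :: t) ((zs.length + 1 : Nat) : Int)).getD [] = b := by
    rw [PySem.List.pyGet?_natCast, pvGetAppend]
    rfl
  have hia : (PySem.List.pyGet? (zs ++ a :: b :: t) (((zs.length + 1 : Nat) : Int) - 1)).getD [] = a := by
    rw [show (((zs.length + 1 : Nat) : Int) - 1) = ((zs.length : Nat) : Int) from by push_cast; ring,
      PySem.List.pyGet?_natCast, pvGetAppend0]
    rfl
  unfold pvAStep
  simp only [hib, hia, pvHead0, pvGet1]
  by_cases hk : pvKey flg a = pvKey flg b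
  · rw [if_pos ((pvEqA_iff flg a b).mpr hk), if_pos hk]
    have : zs.length + 1 - 1 = zs.length := by omega
    rw [this, pvSetAppend]
    simp only [List.set_cons_zero]
    rw [pvEraseAppend]
    simp [pvBump]
  · rw [if_neg (by simpa using (not_iff_not.mpr (pvEqA_iff flg a b)).mpr hk), if_neg hk]

-- A's loop computes pvMergeA on the processed prefix
theorem pvALoop_eq (flg : Bool) : ∀ (i : Nat) (l : List (List Int)), i < l.length →
    pvALoop flg l i = pvMergeA flg (l.take (i + 1)) ++ l.drop (i + 1) := by
  intro i
  induction i with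
  | zero =>
    intro l hl
    cases l with
    | nil => simp at hl
    | cons x l' => simp [pvALoop, pvMergeA, pvIns]
  | succ i ih =>
    intro l hl
    obtain ⟨zs, a, b, t, rfl, hzs⟩ :
        ∃ zs a b t, l = zs ++ a :: b :: t ∧ zs.length = i := by
      refine ⟨l.take i, l[i]'(by omega), l[i + 1]'hl, l.drop (i + 2), ?_, by simp; omega⟩
      conv_lhs => rw [← List.take_append_drop i l]
      rw [List.drop_eq_getElem_cons (by omega), List.drop_eq_getElem_cons (by omega)]
    subst hzs
    show pvALoop flg (pvAStep flg _ (zs.length + 1)) zs.length = _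
    rw [pvAStep_split]
    by_cases hk : pvKey flg a = pvKey flg b
    · rw [if_pos hk, ih _ (by simp)]
      rw [pvTakeAppend zs _ 1, pvDropAppend zs _ 1]
      rw [show zs.length + 1 + 1 = zs.length + 2 from rfl,
        pvTakeAppend zs _ 2, pvDropAppend zs _ 2]
      simp only [List.take, List.drop]
      rw [pvMergeA_append_eq flg zs a b hk]
    · rw [if_neg hk, ih _ (by simp)]
      rw [pvTakeAppend zs _ 1, pvDropAppend zs _ 1]
      rw [show zs.length + 1 + 1 = zs.length + 2 from rfl,
        pvTakeAppend zs _ 2, pvDropAppend zs _ 2]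
      simp only [List.take, List.drop]
      rw [pvMergeA_append_ne flg zs a b hk]
      simp

theorem pvBUpd_append (out : List (List Int)) (r : List Int) (c : Int) :
    pvBUpd (out ++ [r]) c = out ++ [pvBump r c] := by
  have hlast : PySem.List.pyGet? (out ++ [r]) (-1) = some r := by
    simp [PySem.List.pyGet?, PySem.List.pyIdx?]
  unfold pvBUpd
  rw [hlast]
  simp only [Option.getD_some, List.length_append, List.length_cons, List.length_nil]
  rw [show out.length + 1 - 1 = out.length from by omega, pvSetAppend]
  rw [pvGet1]
  rfl

-- B's loop computes pvMergeA
theorem pvBGo_eq (flg : Bool) : ∀ (rest out : List (List Int)) (r : List Int),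
    pvGood flg (r :: rest) →
    pvBGo flg (out ++ [r]) (some (pvKey flg r)) rest = out ++ pvMergeA flg (r :: rest) := by
  intro rest
  induction rest with
  | nil => intro out r _; simp [pvBGo, pvMergeA, pvIns]
  | cons x rest' ih =>
    intro out r hgood
    show (if (!(out ++ [r]).isEmpty) && (some (pvKey flg r) == some (pvKeyB flg x)) then _ else _) = _
    rw [pvKeyB_eq]
    by_cases hk : pvKey flg r = pvKey flg x
    · rw [if_pos (by simp [hk])]
      obtain ⟨hlen, hgood'⟩ := hgood
      obtain ⟨hr2, hx2⟩ := hlen hk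
      rw [pvGet1, pvBUpd_append]
      have hkey : some (pvKey flg x) = some (pvKey flg (pvBump r (x[1]?.getD 0))) := by
        rw [pvKey_bump, hk]
      rw [hkey, ih out (pvBump r (x[1]?.getD 0)) ?_]
      · rw [pvMergeA_front flg r x rest' hr2 hx2 hk]
      · -- pvGood (pvBump r _ :: rest')
        cases rest' with
        | nil => trivial
        | cons y t =>
          refine ⟨fun hby => ?_, hgood'.2⟩
          rw [pvKey_bump, hk] at hby
          obtain ⟨hx2', hy2⟩ := hgood'.1 hby
          exact ⟨by rw [pvBump_length]; exact hr2, hy2⟩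
    · rw [if_neg (by simp [hk])]
      rw [ih (out ++ [r]) x hgood.2]
      obtain ⟨z, t', hz, hzk⟩ := pvMergeA_head flg x rest'
      have hm : pvMergeA flg (r :: x :: rest') = r :: pvMergeA flg (x :: rest') := by
        show pvIns flg r (pvMergeA flg (x :: rest')) = _
        rw [hz]
        simp [pvIns, hzk.symm ▸ hk]
      rw [hm]
      simp

-- Pre_ on a list implies pvGood of that list
theorem pvPre_good (flg : Bool) : ∀ (l : List (List Int)),
    (∀ r ∈ l, r ≠ [] ∧ (r.length = 1 → (l.map (pvKey flg)).count (pvKey flg r) ≤ 1)) →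
    pvGood flg l := by
  intro l
  induction l with
  | nil => intro _; trivial
  | cons a l' ih =>
    intro h
    cases l' with
    | nil => trivial
    | cons b t =>
      constructor
      · intro hab
        have ha := h a (by simp)
        have hb := h b (by simp)
        have hcnt : 2 ≤ ((a :: b :: t).map (pvKey flg)).count (pvKey flg a) := by
          have hm : ((a :: b :: t).map (pvKey flg)) =
              pvKey flg a :: pvKey flg b :: t.map (pvKey flg) := by simp
          rw [hm, hab, List.count_cons_self, List.count_cons_self]
          omega
        constructor
        · have h1 : a.length ≠ 1 := fun h1 => by have := ha.2 h1; omega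
          have h0 : a.length ≠ 0 := fun h0 => ha.1 (List.length_eq_zero_iff.mp h0)
          omega
        · have hcntb : 2 ≤ ((a :: b :: t).map (pvKey flg)).count (pvKey flg b) := by
            rw [← hab]; exact hcnt
          have h1 : b.length ≠ 1 := fun h1 => by have := hb.2 h1; omega
          have h0 : b.length ≠ 0 := fun h0 => hb.1 (List.length_eq_zero_iff.mp h0)
          omega
      · apply ih
        intro r hr
        have := h r (by simp [hr])
        refine ⟨this.1, fun h1 => ?_⟩
        have hle : ((b :: t).map (pvKey flg)).count (pvKey flg r) ≤
            ((a :: b :: t).map (pvKey flg)).count (pvKey flg r) := by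
          simp only [List.map_cons, List.count_cons]
          omega
        have := this.2 h1
        omega

-- ===== VERDICT (by name: the statement is the Claim_ definition above) =====
theorem dereplicate_and_count_spec : Claim_equal_dereplicate_and_count := by
  intro ls flg _dom hpre
  unfold Spec_dereplicate_and_count dereplicate_and_count dereplicate_and_count_alt
  by_cases hlen : ls.length < 2
  · simp [hlen]
  · rw [if_neg hlen, if_neg hlen]
    have hKA : pvKeyA flg = pvKey flg := funext (pvKeyA_eq flg)
    have hKB : pvKeyB flg = pvKey flg := funext (pvKeyB_eq flg)
    rw [hKA, hKB]
    have hslen : (PySem.List.sorted ls (pvKey flg) false).length = ls.length :=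
      PySem.List.length_sorted ..
    cases hs : PySem.List.sorted ls (pvKey flg) false with
    | nil => rw [hs] at hslen; simp at hslen; omega
    | cons x s' =>
      have hgood : pvGood flg (x :: s') := by
        rw [← hs]
        apply pvPre_good
        intro r hr
        have hrls : r ∈ ls := (PySem.List.mem_sorted ..).mp hr
        have hp : (PySem.List.sorted ls (pvKey flg) false).Perm ls := PySem.List.sorted_perm ..
        have hcnt : ((PySem.List.sorted ls (pvKey flg) false).map (pvKey flg)).count
            (pvKey flg r) = (ls.map (pvKey flg)).count (pvKey flg r) :=
          (hp.map (pvKey flg)).count_eq _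
        obtain ⟨h1, h2⟩ := (hpre.resolve_left hlen) r hrls
        exact ⟨h1, fun hl => by rw [hcnt]; exact h2 hl⟩
    -- A side
      have hA : pvALoop flg (x :: s') ((x :: s').length - 1) = pvMergeA flg (x :: s') := by
        rw [show (x :: s').length - 1 = s'.length from by simp]
        rw [pvALoop_eq flg s'.length (x :: s') (by simp)]
        rw [show s'.length + 1 = (x :: s').length from by simp]
        rw [List.take_length, List.drop_length]
        simp
    -- B side
      have hB : pvBGo flg [] none (x :: s') = pvMergeA flg (x :: s') := by
        rw [show pvBGo flg [] none (x :: s') = pvBGo flg ([] ++ [x]) (some (pvKeyB flg x)) s' from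
          by simp [pvBGo]]
        rw [pvKeyB_eq]
        exact pvBGo_eq flg s' [] x hgood
      show pvALoop flg (x :: s') ((x :: s').length - 1) = pvBGo flg [] none (x :: s')
      rw [hA, hB]
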